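-- pv_equiv track=rewrite | github.com/AxelOliveira/curso-python | material-curso-python/secao_4_python_intermediario_funcoes_dicionarios_modulos/aula_25_exercicio_encontre_o_primeiro_duplicado_considerando_a_segunda_ocorrencia.py | lista
-- ===== SOURCE A (Python) =====
-- def lista(lista_de_listas_de_inteiros):
--     resultados = []
--
--     # 2. Percorrer a lista em ordem, do início ao fim
--     for listas in lista_de_listas_de_inteiros:
--         numeros_repetidos = set()
--         duplicado = -1
--
--         # 3. Para cada numero dentro de cada lista
--         for numero in listas:
--
--             # 4. Para cada valor:
--             # - Verificar se o valor já está no set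
--             if numero in numeros_repetidos:
--                 duplicado = numero
--
--                 # - Se estiver, retornar esse valor e encerrar a função
--                 break
--
--             # 5. Adiciona o número ao conjunto de números já vistos
--             numeros_repetidos.add(numero)
--
--         # 6. Adiciona o resultado da lista atual à lista de resultados
--         resultados.append(duplicado)
--
--     # 7. Retorna a lista com os duplicados encontrados
--     return resultados
-- ===== SOURCE B (Python) =====
-- def lista(lista_de_listas_de_inteiros):
--     resultados = []
--     for listas in lista_de_listas_de_inteiros:
--         # values that occur more than once; the answer is the repeated value
--         # whose SECOND occurrence comes first in the list
--         repetidos = [v for v in listas if listas.count(v) > 1]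
--         if repetidos:
--             resultados.append(
--                 min(repetidos, key=lambda v: listas.index(v, listas.index(v) + 1)))
--         else:
--             resultados.append(-1)
--     return resultados
-- ===== Notes on version B (the rewrite author's own statement) =====
-- stated objective: alternative
-- what changed: Instead of A's single left-to-right scan with a seen-set and break, B aggregates: it collects the values occurring more than once (count pass) and returns the one whose second-occurrence index (two index() calls) is smallest, -1 if none repeat.
import Mathlib
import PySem

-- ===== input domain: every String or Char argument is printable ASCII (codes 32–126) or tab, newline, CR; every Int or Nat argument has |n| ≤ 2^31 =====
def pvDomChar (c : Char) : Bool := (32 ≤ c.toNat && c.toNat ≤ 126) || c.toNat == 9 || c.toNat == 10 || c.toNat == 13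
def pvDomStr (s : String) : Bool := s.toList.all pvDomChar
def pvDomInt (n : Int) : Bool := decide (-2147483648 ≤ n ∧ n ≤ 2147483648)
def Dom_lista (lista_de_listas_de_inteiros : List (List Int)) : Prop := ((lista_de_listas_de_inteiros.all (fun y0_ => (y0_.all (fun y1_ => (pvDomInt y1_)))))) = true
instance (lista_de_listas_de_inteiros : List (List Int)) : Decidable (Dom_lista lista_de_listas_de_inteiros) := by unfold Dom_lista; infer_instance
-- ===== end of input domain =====

-- B replaces A's single seen-set scan with break by an aggregation: collect the values occurring
-- more than once and take the one whose SECOND occurrence index (count/index passes) is smallest.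

-- ===== PORT A =====
-- inner 'for numero in listas' with seen set and break
def listaInner : List Int → PySem.Set Int → Int
  | [], _ => -1
  | numero :: rest, numeros_repetidos =>
      if PySem.Set.contains numeros_repetidos numero then numero
      else listaInner rest (PySem.Set.add numeros_repetidos numero)

def lista (lista_de_listas_de_inteiros : List (List Int)) : List Int :=
  lista_de_listas_de_inteiros.foldl
    (fun resultados listas => resultados ++ [listaInner listas PySem.Set.empty]) []

-- ===== PORT B =====
-- 'listas.index(v, listas.index(v) + 1)' — the index of v's second occurrence
-- (the 'none' branches are where Python would raise ValueError; unreachable for v with count > 1)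
def secondKey (listas : List Int) (v : Int) : Nat :=
  match PySem.List.index? listas v with
  | none => 0
  | some i =>
    match PySem.List.index? (listas.drop (i + 1)) v with
    | none => 0
    | some j => i + 1 + j

-- '[v for v in listas if listas.count(v) > 1]' then 'min(repetidos, key=…) if repetidos else -1'
def listaAltInner (listas : List Int) : Int :=
  let repetidos := listas.filter (fun v => 1 < PySem.List.count listas v)
  match PySem.List.min? repetidos (fun v => secondKey listas v) with
  | some m => m
  | none => -1

def lista_alt (lista_de_listas_de_inteiros : List (List Int)) : List Int :=
  lista_de_listas_de_inteiros.foldl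
    (fun resultados listas => resultados ++ [listaAltInner listas]) []

-- ===== PRECONDITION & SPEC =====
def Spec_lista (lista_de_listas_de_inteiros : List (List Int)) (out : List Int) : Prop := out = lista_alt lista_de_listas_de_inteiros
instance (lista_de_listas_de_inteiros : List (List Int)) (out : List Int) : Decidable (Spec_lista lista_de_listas_de_inteiros out) := by unfold Spec_lista; infer_instance

-- ===== CLAIM (what is proved, stated in full; the proofs are below) =====
def Claim_equal_lista : Prop := ∀ (lista_de_listas_de_inteiros : List (List Int)), Dom_lista lista_de_listas_de_inteiros → Spec_lista lista_de_listas_de_inteiros (lista lista_de_listas_de_inteiros)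

-- ===== LEMMAS AND PROOFS =====

-- A's inner loop returns -1 when nothing repeats and nothing is already seen
theorem inner_of_nodup (xs : List Int) : ∀ seen : PySem.Set Int, xs.Nodup →
    (∀ x ∈ xs, x ∉ seen) → listaInner xs seen = -1 := by
  induction xs with
  | nil => intro seen _ _; rfl
  | cons x rest ih =>
    intro seen hnd hout
    have hx : x ∉ seen := hout x (by simp)
    have hc : PySem.Set.contains seen x = false := by
      simp [PySem.Set.contains_eq_listContains, List.contains_eq_mem, hx]
    rw [listaInner, hc, if_neg (by simp)]
    apply ih _ hnd.of_cons
    intro y hy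
    have := PySem.Set.mem_add (s := seen) (x := x) (y := y)
    rw [this]
    push Not
    exact ⟨hout y (by simp [hy]), fun h => (List.nodup_cons.mp hnd).1 (h ▸ hy)⟩

-- A's inner loop returns v when the prefix before v has no repeat and v repeats first
theorem inner_found (ys : List Int) : ∀ (v : Int) (zs : List Int) (seen : PySem.Set Int),
    ys.Nodup → (∀ y ∈ ys, y ∉ seen) → (v ∈ seen ∨ v ∈ ys) →
    listaInner (ys ++ v :: zs) seen = v := by
  induction ys with
  | nil =>
    intro v zs seen _ _ hv
    have hv' : v ∈ seen := by simpa using hv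
    have hc : PySem.Set.contains seen v = true := by
      simp [PySem.Set.contains_eq_listContains, List.contains_eq_mem, hv']
    show (if PySem.Set.contains seen v then v else listaInner zs (PySem.Set.add seen v)) = v
    rw [hc, if_pos (by simp)]
  | cons y rest ih =>
    intro v zs seen hnd hout hv
    have hy : y ∉ seen := hout y (by simp)
    have hc : PySem.Set.contains seen y = false := by
      simp [PySem.Set.contains_eq_listContains, List.contains_eq_mem, hy]
    rw [List.cons_append, listaInner, hc, if_neg (by simp)]
    apply ih v zs _ hnd.of_cons
    · intro z hz
      rw [PySem.Set.mem_add]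
      push Not
      exact ⟨hout z (by simp [hz]), fun h => (List.nodup_cons.mp hnd).1 (h ▸ hz)⟩
    · rcases hv with h | h
      · exact Or.inl (by rw [PySem.Set.mem_add]; exact Or.inl h)
      · rcases List.mem_cons.mp h with h | h
        · exact Or.inl (by rw [PySem.Set.mem_add]; exact Or.inr h)

        · exact Or.inr h

-- the second-occurrence index of a repeated value: in range, hits v, and v occurs before it
theorem secondKey_spec (xs : List Int) (v : Int) (hv : v ∈ xs) (hc : 1 < xs.count v) :
    ∃ h : secondKey xs v < xs.length, xs[secondKey xs v] = v ∧ v ∈ xs.take (secondKey xs v) := by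
  obtain ⟨i, hi⟩ : ∃ i, PySem.List.index? xs v = some i := by
    cases h : PySem.List.index? xs v with
    | some i => exact ⟨i, rfl⟩
    | none => exact absurd ((PySem.List.index?_eq_none_iff xs v).mp h) (not_not_intro hv)
  obtain ⟨hilen, hxi, hfirst⟩ := PySem.List.getElem_of_index?_eq_some hi
  have hnin : v ∉ xs.take i := by
    intro hmem
    obtain ⟨j, hj, hje⟩ := List.mem_take_iff_getElem.mp hmem
    exact hfirst j (by omega) hje
  have hcnt1 : (xs.take (i + 1)).count v = 1 := by
    rw [List.take_add_one, List.getElem?_eq_getElem hilen, hxi]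
    simp [List.count_append, List.count_eq_zero.mpr hnin]
  have hsum : xs.count v = (xs.take (i + 1)).count v + (xs.drop (i + 1)).count v := by
    conv_lhs => rw [← List.take_append_drop (i + 1) xs]
    exact List.count_append ..
  have hvd : v ∈ xs.drop (i + 1) := List.count_pos_iff.mp (by omega)
  obtain ⟨j, hj⟩ : ∃ j, PySem.List.index? (xs.drop (i + 1)) v = some j := by
    cases h : PySem.List.index? (xs.drop (i + 1)) v with
    | some j => exact ⟨j, rfl⟩
    | none => exact absurd ((PySem.List.index?_eq_none_iff _ v).mp h) (not_not_intro hvd)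
  obtain ⟨hjlen, hxj, -⟩ := PySem.List.getElem_of_index?_eq_some hj
  have hsk : secondKey xs v = i + 1 + j := by simp only [secondKey, hi, hj]
  have hdl : (xs.drop (i + 1)).length = xs.length - (i + 1) := List.length_drop
  have hlen : i + 1 + j < xs.length := by omega
  refine ⟨by omega, ?_, ?_⟩
  · rw [List.getElem_drop] at hxj
    simp only [hsk]
    exact hxj
  · rw [hsk]
    exact List.mem_take_iff_getElem.mpr ⟨i, by omega, hxi⟩

-- at the first repeat position k (nodup prefix, xs[k] repeats) the key is exactly k
theorem secondKey_at_first_repeat (xs : List Int) (k : Nat) (hk : k < xs.length)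
    (hnd : (xs.take k).Nodup) (hm : xs[k] ∈ xs.take k) : secondKey xs (xs[k]) = k := by
  obtain ⟨i, hik, hxi⟩ := List.mem_take_iff_getElem.mp hm
  have hik' : i < k := by omega
  have hilen : i < xs.length := by omega
  -- no occurrence of xs[k] strictly between two positions both below k
  have hnodup_pair : ∀ p (hp : p < xs.length), i < p → p < k → xs[p] ≠ xs[k] := by
    intro p hp hip hpk heq
    have h1 : (xs.take k)[i]'(by simp; omega) = xs[k] := by
      rw [List.getElem_take]; exact hxi
    have h2 : (xs.take k)[p]'(by simp; omega) = xs[k] := by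
      rw [List.getElem_take]; exact heq
    have := (List.Nodup.getElem_inj_iff hnd).mp (h1.trans h2.symm)
    omega
  have hfi : PySem.List.index? xs (xs[k]) = some i := by
    rw [PySem.List.index?_eq_some_iff]
    refine ⟨xs.take i, xs.drop (i + 1), ?_, by simp; omega, ?_⟩
    · conv_lhs => rw [← List.take_append_drop i xs]
      rw [List.drop_eq_getElem_cons hilen, hxi]
    · intro hmem
      obtain ⟨j, hj, hje⟩ := List.mem_take_iff_getElem.mp hmem
      have h1 : (xs.take k)[j]'(by simp; omega) = xs[k] := by
        rw [List.getElem_take]; exact hje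
      have h2 : (xs.take k)[i]'(by simp; omega) = xs[k] := by
        rw [List.getElem_take]; exact hxi
      have := (List.Nodup.getElem_inj_iff hnd).mp (h1.trans h2.symm)
      omega
  have hsi : PySem.List.index? (xs.drop (i + 1)) (xs[k]) = some (k - (i + 1)) := by
    rw [PySem.List.index?_eq_some_iff]
    refine ⟨(xs.drop (i + 1)).take (k - (i + 1)), xs.drop (k + 1), ?_, by simp; omega, ?_⟩
    · conv_lhs => rw [← List.take_append_drop (k - (i + 1)) (xs.drop (i + 1))]
      rw [List.drop_drop, show i + 1 + (k - (i + 1)) = k by omega,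
        List.drop_eq_getElem_cons hk]
    · intro hmem
      obtain ⟨t, ht, hte⟩ := List.mem_take_iff_getElem.mp hmem
      rw [List.getElem_drop] at hte
      exact hnodup_pair (i + 1 + t) (by simp at ht; omega) (by omega) (by simp at ht; omega) hte
  simp only [secondKey, hfi, hsi]
  omega

-- the two inner computations agree
theorem inner_eq (xs : List Int) : listaInner xs PySem.Set.empty = listaAltInner xs := by
  by_cases hn : xs.Nodup
  · have hA : listaInner xs PySem.Set.empty = -1 :=
      inner_of_nodup xs PySem.Set.empty hn (by intro x _ hx; simp [PySem.Set.empty] at hx)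
    have hf : xs.filter (fun v => 1 < PySem.List.count xs v) = [] := by
      rw [List.filter_eq_nil_iff]
      intro v hv
      have := List.nodup_iff_count_le_one.mp hn v
      simp [PySem.List.count_eq]
      omega
    rw [hA, listaAltInner, hf]
    rfl
  · have hex : ∃ m, ¬(xs.take (m + 1)).Nodup :=
      ⟨xs.length, by rw [List.take_of_length_le (by omega)]; exact hn⟩
    obtain ⟨k, hk, hmin⟩ : ∃ k, ¬(xs.take (k + 1)).Nodup ∧ ∀ m, m < k → (xs.take (m + 1)).Nodup := by
      refine ⟨Nat.find hex, Nat.find_spec hex, ?_⟩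
      intro m hm
      by_contra h
      exact absurd (Nat.find_min' hex h) (by omega)
    have htkn : (xs.take k).Nodup := by
      cases k with
      | zero => simp
      | succ m => exact hmin m (by omega)
    have hklen : k < xs.length := by
      by_contra h
      have heq : xs.take k = xs := List.take_of_length_le (by omega)
      exact hn (heq ▸ htkn)
    have hsucc : xs.take (k + 1) = xs.take k ++ [xs[k]] := by
      rw [List.take_add_one, List.getElem?_eq_getElem hklen]
      rfl
    have hvmem : xs[k] ∈ xs.take k := by
      by_contra hv
      refine hk ?_
      rw [hsucc]
      refine htkn.append (List.nodup_singleton _) ?_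
      intro a ha hb
      have hav : a = xs[k] := by simpa using hb
      exact hv (hav ▸ ha)
    -- A returns the first repeated element xs[k]
    have hA : listaInner xs PySem.Set.empty = xs[k] := by
      conv_lhs => rw [← List.take_append_drop k xs, List.drop_eq_getElem_cons hklen]
      exact inner_found (xs.take k) (xs[k]) (xs.drop (k + 1)) PySem.Set.empty htkn
        (by intro y _ hy; simp [PySem.Set.empty] at hy) (Or.inr hvmem)
    -- B's candidate list contains xs[k] and min? picks it
    have hcnt : 1 < xs.count (xs[k]) := by
      have h1 : (xs.take (k + 1)).count (xs[k]) ≤ xs.count (xs[k]) :=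
        (List.take_sublist (k + 1) xs).count_le _
      have h2 : 0 < (xs.take k).count (xs[k]) := List.count_pos_iff.mpr hvmem
      rw [hsucc, List.count_append] at h1
      simp at h1
      omega
    have hkmem : xs[k] ∈ xs.filter (fun v => 1 < PySem.List.count xs v) := by
      rw [List.mem_filter]
      exact ⟨List.getElem_mem hklen, by simp [PySem.List.count_eq]; omega⟩
    obtain ⟨m, hminq⟩ : ∃ m, PySem.List.min? (xs.filter (fun v => 1 < PySem.List.count xs v))
        (fun v => secondKey xs v) = some m := by
      cases h : PySem.List.min? (xs.filter (fun v => 1 < PySem.List.count xs v))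
          (fun v => secondKey xs v) with
      | some m => exact ⟨m, rfl⟩
      | none => exact absurd ((PySem.List.min?_eq_none_iff _ _).mp h) (List.ne_nil_of_mem hkmem)
    have hmmem := PySem.List.min?_mem hminq
    obtain ⟨hmxs, hmcnt⟩ := List.mem_filter.mp hmmem
    have hmcnt' : 1 < xs.count m := by simpa [PySem.List.count_eq] using hmcnt
    have hkeyk : secondKey xs (xs[k]) = k := secondKey_at_first_repeat xs k hklen htkn hvmem
    have hle : secondKey xs m ≤ k := by
      have := PySem.List.min?_isMin hminq (xs[k]) hkmem
      omega
    obtain ⟨hmlen, hmx, hmtake⟩ := secondKey_spec xs m hmxs hmcnt'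
    have hge : k ≤ secondKey xs m := by
      have hnotnod : ¬(xs.take (secondKey xs m + 1)).Nodup := by
        intro hnod
        have hsucc2 : xs.take (secondKey xs m + 1) = xs.take (secondKey xs m) ++ [m] := by
          rw [List.take_add_one, List.getElem?_eq_getElem hmlen, hmx]
          rfl
        rw [hsucc2] at hnod
        simp [List.nodup_append] at hnod
        exact hnod.2 m hmtake rfl
      by_contra hlt
      exact hnotnod (hmin _ (by omega))
    have hkey : secondKey xs m = k := by omega
    have hmeq : m = xs[k] := by
      simp only [hkey] at hmx
      exact hmx.symm
    have hB : listaAltInner xs = m := by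
      simp only [listaAltInner]
      rw [hminq]
    rw [hA, hB, hmeq]

-- ===== VERDICT (by name: the statement is the Claim_ definition above) =====
theorem lista_spec : Claim_equal_lista := by
  intro xss _
  show lista xss = lista_alt xss
  simp only [lista, lista_alt, inner_eq]
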